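-- pv_equiv track=rewrite | github.com/barryWhiteHat/semaphore | ethsnarks/shamirspoly.py | shamirs_poly_n
-- ===== SOURCE A (Python) =====
-- def shamirs_poly_n(x, a, n):
--     assert isinstance(a, (list,tuple))
--     assert len(a) >= 2
--
--     result = a[0]
--     x_pow_i = x
--
--     for i, a_i in list(enumerate(a))[1:]:
--         ai_mul_xi = (a_i * x_pow_i) % n
--         result = (result + ai_mul_xi) % n
--         x_pow_i *= x
--
--     return result
-- ===== SOURCE B (Python) =====
-- def shamirs_poly_n(x, a, n):
--     assert isinstance(a, (list, tuple))
--     assert len(a) >= 2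
--     result = 0
--     for a_i in reversed(a):
--         result = (result * x + a_i) % n
--     return result
-- ===== Notes on version B (the rewrite author's own statement) =====
-- stated objective: faster
-- what changed: Replaces the per-term evaluation with an ever-growing unreduced power x_pow_i (whose bit length grows linearly, making each multiplication more expensive) by Horner's rule with the accumulator reduced mod n at every step, so all intermediate values stay bounded by n and x.
import Mathlib
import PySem

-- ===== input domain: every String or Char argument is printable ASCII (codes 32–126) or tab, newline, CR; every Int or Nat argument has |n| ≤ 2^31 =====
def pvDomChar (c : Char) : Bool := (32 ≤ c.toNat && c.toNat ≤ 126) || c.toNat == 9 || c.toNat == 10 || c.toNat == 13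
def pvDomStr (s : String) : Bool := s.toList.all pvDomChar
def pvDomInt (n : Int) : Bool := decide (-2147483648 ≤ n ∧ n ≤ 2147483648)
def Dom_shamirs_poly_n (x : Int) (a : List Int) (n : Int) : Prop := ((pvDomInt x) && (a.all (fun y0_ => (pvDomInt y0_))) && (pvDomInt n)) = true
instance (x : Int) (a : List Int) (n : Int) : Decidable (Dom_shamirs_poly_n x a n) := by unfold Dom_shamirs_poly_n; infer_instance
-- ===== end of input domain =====

-- B replaces A's unreduced running power x_pow_i with Horner's rule reduced mod n each step
-- (objective: faster — bounded intermediates instead of a power whose size grows every iteration).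


-- ===== PORT A =====
-- result = a[0]; x_pow_i = x; for i, a_i in list(enumerate(a))[1:]: ... (the index i is unused).
-- a[0] is ported with default 0: Pre_ guarantees a.length ≥ 2, where pyGetD a 0 0 = a[0] exactly.
def shamirs_poly_n (x : Int) (a : List Int) (n : Int) : Int :=
  (((PySem.List.enumerate a).drop 1).foldl
    (fun (s : Int × Int) (p : Int × Int) =>
      let ai_mul_xi := PySem.Int.mod (p.2 * s.2) n
      (PySem.Int.mod (s.1 + ai_mul_xi) n, s.2 * x))
    (PySem.List.pyGetD a 0 0, x)).1

-- ===== PORT B =====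
-- result = 0; for a_i in reversed(a): result = (result * x + a_i) % n
def shamirs_poly_n_alt (x : Int) (a : List Int) (n : Int) : Int :=
  a.reverse.foldl (fun result a_i => PySem.Int.mod (result * x + a_i) n) 0

-- ===== PRECONDITION & SPEC =====
-- A raises AssertionError when len(a) < 2 and ZeroDivisionError when n == 0; Pre_ excludes exactly those.
def Pre_shamirs_poly_n (x : Int) (a : List Int) (n : Int) : Prop := 2 ≤ a.length ∧ n ≠ 0
instance (x : Int) (a : List Int) (n : Int) : Decidable (Pre_shamirs_poly_n x a n) := by unfold Pre_shamirs_poly_n; infer_instance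
def pvWitness_shamirs_poly_n : Int × List Int × Int := (3, [1, 2, 5], 7)
def Spec_shamirs_poly_n (x : Int) (a : List Int) (n : Int) (out : Int) : Prop := out = shamirs_poly_n_alt x a n
instance (x : Int) (a : List Int) (n : Int) (out : Int) : Decidable (Spec_shamirs_poly_n x a n out) := by unfold Spec_shamirs_poly_n; infer_instance

-- ===== CLAIM (what is proved, stated in full; the proofs are below) =====
def Claim_equal_shamirs_poly_n : Prop := ∀ (x : Int) (a : List Int) (n : Int), Dom_shamirs_poly_n x a n → Pre_shamirs_poly_n x a n → Spec_shamirs_poly_n x a n (shamirs_poly_n x a n)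

-- ===== LEMMAS AND PROOFS =====

-- Horner value of a coefficient list (low degree first): the polynomial both programs compute mod n.
def pvHorner (x : Int) : List Int → Int
  | [] => 0
  | c :: t => c + x * pvHorner x t

theorem pv_fmod_modeq (a n : Int) : a.fmod n ≡ a [ZMOD n] := by
  show a.fmod n % n = a % n
  rw [Int.fmod_eq_emod]; split_ifs with h
  · simp
  · simp

theorem pv_fmod_congr (a b n : Int) (h : a ≡ b [ZMOD n]) : a.fmod n = b.fmod n := by
  simp only [Int.fmod_eq_emod, Int.dvd_iff_emod_eq_zero, Int.ModEq] at *
  rw [h]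

-- B's fold computes fmod of the Horner value.
theorem pv_alt_eq (x n : Int) (a : List Int) (h : a ≠ []) :
    shamirs_poly_n_alt x a n = (pvHorner x a).fmod n := by
  unfold shamirs_poly_n_alt
  simp only [PySem.Int.mod]
  rw [List.foldl_reverse]
  induction a with
  | nil => simp at h
  | cons c t ih =>
    simp only [List.foldr_cons, pvHorner]
    rcases eq_or_ne t ([] : List Int) with rfl | ht
    · simp [pvHorner]
    · rw [ih ht]
      apply pv_fmod_congr
      have hm := (pv_fmod_modeq (pvHorner x t) n).mul_right x |>.add_right c
      rw [show c + x * pvHorner x t = pvHorner x t * x + c from by ring]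
      exact hm

-- A's loop invariant: folding over a nonempty tail t with state (r, p) yields fmod (r + p * pvHorner x t) n.
theorem pv_loopA (x n : Int) (t : List Int) (r p : Int) (ht : t ≠ []) :
    ((t.foldl (fun (s : Int × Int) c =>
        ((s.1 + (c * s.2).fmod n).fmod n, s.2 * x)) (r, p)).1)
      = (r + p * pvHorner x t).fmod n := by
  induction t generalizing r p with
  | nil => simp at ht
  | cons c t' ih =>
    simp only [List.foldl_cons, pvHorner]
    rcases eq_or_ne t' ([] : List Int) with rfl | ht'
    · simp only [List.foldl_nil, pvHorner, mul_zero, add_zero]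
      exact pv_fmod_congr _ _ _
        (((pv_fmod_modeq (c * p) n).add_left r).trans (by rw [mul_comm c p]))
    · rw [ih _ _ ht']
      apply pv_fmod_congr
      have h2 : (r + (c * p).fmod n).fmod n ≡ r + c * p [ZMOD n] :=
        (pv_fmod_modeq _ n).trans ((pv_fmod_modeq (c * p) n).add_left r)
      have h3 := h2.add_right (p * x * pvHorner x t')
      rw [show r + p * (c + x * pvHorner x t') = r + c * p + p * x * pvHorner x t' from by ring]
      exact h3

-- The index produced by enumerate is unused by A's loop body: fold over enumerate = fold over the coefficients.
theorem pv_enum_fold (x n : Int) (a : List Int) (r p : Int) :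
    ((PySem.List.enumerate a).drop 1).foldl
        (fun (s : Int × Int) (q : Int × Int) =>
          let ai_mul_xi := PySem.Int.mod (q.2 * s.2) n
          (PySem.Int.mod (s.1 + ai_mul_xi) n, s.2 * x)) (r, p)
      = (a.drop 1).foldl
        (fun (s : Int × Int) c =>
          ((s.1 + (c * s.2).fmod n).fmod n, s.2 * x)) (r, p) := by
  have hmap : (a.drop 1) = ((PySem.List.enumerate a).drop 1).map Prod.snd := by
    rw [List.map_drop, PySem.List.map_snd_enumerate]
  rw [hmap, List.foldl_map]
  rfl

-- ===== VERDICT (by name: the statement is the Claim_ definition above) =====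
theorem shamirs_poly_n_spec : Claim_equal_shamirs_poly_n := by
  intro x a n _ hpre
  obtain ⟨hlen, -⟩ := hpre
  unfold Spec_shamirs_poly_n shamirs_poly_n
  match a, hlen with
  | a0 :: c :: t, _ =>
    rw [pv_enum_fold]
    simp only [List.drop_succ_cons, List.drop_zero]
    rw [pv_loopA x n (c :: t) _ _ (by simp),
      pv_alt_eq x n (a0 :: c :: t) (by simp)]
    have h0 : PySem.List.pyGetD (a0 :: c :: t) 0 0 = a0 := by simp [pysem]
    rw [h0]
    simp only [pvHorner]
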